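-- pv_equiv track=rewrite | github.com/cyanine1228/py.practice | baekjoon/py/16880.py | king
-- ===== SOURCE A (Python) =====
-- def king(x, y):
--     if (x >= 2) & (y >= 2):
--         k = min(x // 2, y // 2)
--         return king(x - k * 2, y - k * 2)
--     if x == 0:
--         return y % 2
--     if y == 0:
--         return x % 2
--     return (x + y) % 2 + 2
-- ===== SOURCE B (Python) =====
-- def king(x, y):
--     if x >= 2 and y >= 2:
--         return abs(x - y) % 2 + 2 * (min(x, y) % 2)
--     if x == 0:
--         return y % 2
--     if y == 0:
--         return x % 2
--     return (x + y) % 2 + 2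
-- ===== Notes on version B (the rewrite author's own statement) =====
-- stated objective: simpler
-- what changed: The recursive x>=2,y>=2 branch (subtract min(x//2,y//2) king-moves and recurse) is replaced by the closed form abs(x-y)%2 + 2*(min(x,y)%2); no recursion remains, base branches unchanged.
import Mathlib
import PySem

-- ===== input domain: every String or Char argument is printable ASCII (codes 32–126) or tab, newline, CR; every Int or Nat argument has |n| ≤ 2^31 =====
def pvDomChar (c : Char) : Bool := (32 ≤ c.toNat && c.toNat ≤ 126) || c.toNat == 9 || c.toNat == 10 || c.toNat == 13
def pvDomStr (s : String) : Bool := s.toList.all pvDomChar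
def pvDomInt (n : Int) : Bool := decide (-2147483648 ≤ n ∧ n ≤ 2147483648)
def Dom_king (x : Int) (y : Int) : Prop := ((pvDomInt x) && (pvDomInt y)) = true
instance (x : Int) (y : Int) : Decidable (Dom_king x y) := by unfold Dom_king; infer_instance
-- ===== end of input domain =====

-- B replaces A's one-step recursion on (x - 2*min(x//2,y//2), y - 2*min(x//2,y//2)) by the
-- closed form abs(x-y)%2 + 2*(min(x,y)%2); simpler: no recursion remains.

-- ===== PORT A =====
def king (x : Int) (y : Int) : Int :=
  if x ≥ 2 ∧ y ≥ 2 then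
    let k := min (PySem.Int.floordiv x 2) (PySem.Int.floordiv y 2)
    king (x - k * 2) (y - k * 2)
  else if x = 0 then PySem.Int.mod y 2
  else if y = 0 then PySem.Int.mod x 2
  else PySem.Int.mod (x + y) 2 + 2
termination_by x.toNat
decreasing_by
  rename_i h
  have hx : PySem.Int.floordiv x 2 = x / 2 := PySem.Int.floordiv_eq_ediv_of_pos (by omega)
  have hy : PySem.Int.floordiv y 2 = y / 2 := PySem.Int.floordiv_eq_ediv_of_pos (by omega)
  simp only [hx, hy]
  omega

-- ===== PORT B =====
def king_alt (x : Int) (y : Int) : Int :=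
  if x ≥ 2 ∧ y ≥ 2 then
    PySem.Int.mod |x - y| 2 + 2 * PySem.Int.mod (min x y) 2
  else if x = 0 then PySem.Int.mod y 2
  else if y = 0 then PySem.Int.mod x 2
  else PySem.Int.mod (x + y) 2 + 2

-- ===== PRECONDITION & SPEC =====
def Spec_king (x : Int) (y : Int) (out : Int) : Prop := out = king_alt x y
instance (x : Int) (y : Int) (out : Int) : Decidable (Spec_king x y out) := by unfold Spec_king; infer_instance

-- ===== CLAIM (what is proved, stated in full; the proofs are below) =====
def Claim_equal_king : Prop := ∀ (x : Int) (y : Int), Dom_king x y → Spec_king x y (king x y)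

-- ===== LEMMAS AND PROOFS =====
theorem mod_two_emod (a : Int) : PySem.Int.mod a 2 = a % 2 :=
  PySem.Int.mod_eq_emod_of_pos (by norm_num)

theorem king_eq_alt (x y : Int) : king x y = king_alt x y := by
  by_cases h : x ≥ 2 ∧ y ≥ 2
  · rw [king, king_alt]
    simp only [h, if_pos, and_true]
    have hx : PySem.Int.floordiv x 2 = x / 2 := PySem.Int.floordiv_eq_ediv_of_pos (by omega)
    have hy : PySem.Int.floordiv y 2 = y / 2 := PySem.Int.floordiv_eq_ediv_of_pos (by omega)
    simp only [hx, hy]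
    set k : Int := min (x / 2) (y / 2) with hk
    set a : Int := x - k * 2 with ha
    set b : Int := y - k * 2 with hb
    have hab : 0 ≤ a ∧ 0 ≤ b ∧ (a < 2 ∨ b < 2) := by
      rcases le_total (x / 2) (y / 2) with hle | hle <;>
        simp only [hk, min_eq_left hle, min_eq_right hle] at ha hb ⊢ <;> omega
    rw [king]
    have hg : ¬ (a ≥ 2 ∧ b ≥ 2) := by omega
    simp only [hg, if_false]
    simp only [mod_two_emod]
    rcases le_total x y with hxy | hxy
    · rw [abs_of_nonpos (by omega), min_eq_left hxy]
      split_ifs with h1 h2 <;> omega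
    · rw [abs_of_nonneg (by omega), min_eq_right hxy]
      split_ifs with h1 h2 <;> omega
  · rw [king, king_alt]
    simp only [h, if_false]

-- ===== VERDICT (by name: the statement is the Claim_ definition above) =====
theorem king_spec : Claim_equal_king := by
  intro x y _
  exact king_eq_alt x y
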